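-- pv_equiv track=rewrite | github.com/scott-robbins/Research | 2020/Generative/imutils.py | ind2sub
-- ===== SOURCE A (Python) =====
-- def ind2sub(dims):
--     i2s = {}
--     ii = 0
--     for x in range(dims[0]):
--         for y in range(dims[1]):
--             i2s[ii] = [x, y]
--             ii += 1
--     return i2s
-- ===== SOURCE B (Python) =====
-- def ind2sub(dims):
--     rows, cols = dims[0], dims[1]
--     if rows <= 0 or cols <= 0:
--         return {}
--     return {ii: list(divmod(ii, cols)) for ii in range(rows * cols)}
-- ===== Notes on version B (the rewrite author's own statement) =====
-- stated objective: idiomatic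
-- what changed: Replaces the nested x/y loops with a manual running counter by a single comprehension over range(rows*cols) that recovers the coordinates arithmetically with divmod.
-- outside the precondition, e.g. on ind2sub((0,)): A returns {}, B raises IndexError; on ind2sub((-1,)): A returns {}, B raises IndexError
import Mathlib
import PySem

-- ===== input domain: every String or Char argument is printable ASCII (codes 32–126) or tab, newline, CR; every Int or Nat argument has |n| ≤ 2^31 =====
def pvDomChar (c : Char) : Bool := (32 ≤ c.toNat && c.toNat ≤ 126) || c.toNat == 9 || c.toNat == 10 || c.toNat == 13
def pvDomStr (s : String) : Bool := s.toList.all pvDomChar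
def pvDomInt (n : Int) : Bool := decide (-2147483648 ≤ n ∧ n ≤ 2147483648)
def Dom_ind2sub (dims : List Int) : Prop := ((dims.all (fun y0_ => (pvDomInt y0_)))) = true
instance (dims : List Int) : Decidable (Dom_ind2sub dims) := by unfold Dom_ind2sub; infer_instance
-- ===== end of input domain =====

-- B replaces A's nested row/column loops with a manual counter by one pass over
-- range(rows*cols) recovering coordinates with divmod; same cost, more idiomatic.


-- ===== PORT A =====
def ind2sub (dims : List Int) : List (Int × List Int) :=
  let d0 := (PySem.List.pyGet? dims 0).getD 0
  let d1 := (PySem.List.pyGet? dims 1).getD 0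
  let st :=
    (PySem.List.pyRange 0 d0 1).foldl (fun st x =>
      (PySem.List.pyRange 0 d1 1).foldl (fun st y =>
        (st.1.insert st.2 [x, y], st.2 + 1)) st)
      ((PySem.Dict.empty : PySem.Dict Int (List Int)), (0 : Int))
  st.1.items

-- ===== PORT B =====
def ind2sub_alt (dims : List Int) : List (Int × List Int) :=
  let rows := (PySem.List.pyGet? dims 0).getD 0
  let cols := (PySem.List.pyGet? dims 1).getD 0
  if rows ≤ 0 ∨ cols ≤ 0 then []
  else
    (PySem.List.pyRange 0 (rows * cols) 1).map
      (fun ii => (ii, [PySem.Int.floordiv ii cols, PySem.Int.mod ii cols]))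

-- ===== PRECONDITION & SPEC =====
-- Pre_ excludes lists with fewer than two entries: A raises IndexError on them, except the
-- degenerate one-element list with a non-positive entry, where A returns {} only because the
-- inner range expression is never evaluated, while B reads dims[1] unconditionally and raises.
def Pre_ind2sub (dims : List Int) : Prop := 2 ≤ dims.length
instance (dims : List Int) : Decidable (Pre_ind2sub dims) := by unfold Pre_ind2sub; infer_instance
def pvWitness_ind2sub : List Int := [2, 3]

def Spec_ind2sub (dims : List Int) (out : List (Int × List Int)) : Prop := out = ind2sub_alt dims
instance (dims : List Int) (out : List (Int × List Int)) : Decidable (Spec_ind2sub dims out) := by unfold Spec_ind2sub; infer_instance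

-- ===== CLAIM (what is proved, stated in full; the proofs are below) =====
def Claim_equal_ind2sub : Prop := ∀ (dims : List Int), Dom_ind2sub dims → Pre_ind2sub dims → Spec_ind2sub dims (ind2sub dims)

-- ===== LEMMAS AND PROOFS =====

-- The inner loop of A, with its (dict, counter) state, reshaped as a fold over enumerate.
theorem inner_fold_enumerate (x : Int) :
    ∀ (ys : List Int) (d : PySem.Dict Int (List Int)) (c : Int),
      ys.foldl (fun st y => (st.1.insert st.2 [x, y], st.2 + 1)) (d, c)
        = ((PySem.List.enumerate ys c).foldl (fun dd p => dd.insert p.1 [x, p.2]) d,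
           c + ys.length) := by
  intro ys
  induction ys with
  | nil => intro d c; simp [PySem.List.enumerate]
  | cons y t ih =>
      intro d c
      rw [List.foldl_cons, ih, PySem.List.enumerate_cons, List.foldl_cons]
      simp; ring


-- one row's worth of entries, as B arranges them (helper for the proofs only)
def chunkF (b x : Int) : List (Int × List Int) :=
  (PySem.List.pyRange 0 b 1).map (fun y => (x * (b.toNat : Int) + y, [x, y]))

-- the whole table after the first n rows
def lstF (b n : Int) : List (Int × List Int) :=
  (PySem.List.pyRange 0 n 1).flatMap (chunkF b)

theorem enum_shift (b s : Int) :
    PySem.List.enumerate (PySem.List.pyRange 0 b 1) s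
      = (PySem.List.pyRange 0 b 1).map (fun y => (s + y, y)) := by
  apply List.ext_getElem
  · simp [PySem.List.length_enumerate]
  · intro k h1 h2
    simp [PySem.List.getElem_enumerate, PySem.List.getElem_pyRange_one]

theorem key_lt_of_mem (b n : Int) (p : Int × List Int) (hp : p ∈ lstF b n) :
    p.1 < n * (b.toNat : Int) := by
  unfold lstF at hp
  rcases List.mem_flatMap.mp hp with ⟨x, hx, hpx⟩
  rw [PySem.List.mem_pyRange_one] at hx
  unfold chunkF at hpx
  rcases List.mem_map.mp hpx with ⟨y, hy, hpe⟩
  rw [PySem.List.mem_pyRange_one] at hy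
  have hbpos : (0 : Int) < b := lt_of_le_of_lt hy.1 hy.2
  have hbt : ((b.toNat : Int)) = b := by omega
  subst hpe
  simp only [hbt]
  have hx1 : x + 1 ≤ n := hx.2
  have : (x + 1) * b ≤ n * b := mul_le_mul_of_nonneg_right hx1 (le_of_lt hbpos)
  nlinarith [hy.1, hy.2, hx.1]

theorem not_contains_of_ge (b n k : Int) (d : PySem.Dict Int (List Int))
    (hitems : d.items = lstF b n) (hk : n * (b.toNat : Int) ≤ k) :
    d.contains k = false := by
  by_contra h
  have hc : d.contains k = true := by
    cases hcc : d.contains k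
    · exact absurd hcc h
    · rfl
  have hkmem := (PySem.Dict.contains_iff_mem_keys d k).mp hc
  have hkeys : d.keys = d.items.map (fun p => p.1) := rfl
  rw [hkeys, hitems] at hkmem
  rcases List.mem_map.mp hkmem with ⟨p, hp, hpk⟩
  have := key_lt_of_mem b n p hp
  omega

theorem outer_inv (b : Int) (n : Nat) :
    ((PySem.List.pyRange 0 (n : Int) 1).foldl
        (fun st x => (PySem.List.pyRange 0 b 1).foldl
          (fun st y => (st.1.insert st.2 [x, y], st.2 + 1)) st)
        ((PySem.Dict.empty : PySem.Dict Int (List Int)), (0 : Int))).1.items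
        = lstF b (n : Int)
    ∧ ((PySem.List.pyRange 0 (n : Int) 1).foldl
        (fun st x => (PySem.List.pyRange 0 b 1).foldl
          (fun st y => (st.1.insert st.2 [x, y], st.2 + 1)) st)
        ((PySem.Dict.empty : PySem.Dict Int (List Int)), (0 : Int))).2
        = (n : Int) * (b.toNat : Int) := by
  induction n with
  | zero =>
      constructor
      · simp [PySem.List.pyRange_one_eq_nil, lstF, PySem.Dict.empty]
      · simp [PySem.List.pyRange_one_eq_nil]
  | succ m ih =>
      have hsplit : PySem.List.pyRange 0 ((m : Int) + 1) 1
          = PySem.List.pyRange 0 (m : Int) 1 ++ [(m : Int)] :=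
        PySem.List.pyRange_one_succ_right (by exact_mod_cast Nat.zero_le m)
      obtain ⟨ih1, ih2⟩ := ih
      have hcast : ((m + 1 : Nat) : Int) = (m : Int) + 1 := by push_cast; ring
      rw [hcast, hsplit, List.foldl_append, List.foldl_cons, List.foldl_nil]
      set r := (PySem.List.pyRange 0 (m : Int) 1).foldl
        (fun st x => (PySem.List.pyRange 0 b 1).foldl
          (fun st y => (st.1.insert st.2 [x, y], st.2 + 1)) st)
        ((PySem.Dict.empty : PySem.Dict Int (List Int)), (0 : Int)) with hr
    -- one more outer step = the inner loop, reshaped over enumerate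
      have hstep := inner_fold_enumerate (m : Int) (PySem.List.pyRange 0 b 1) r.1 r.2
      have hrpair : r = (r.1, r.2) := rfl
      rw [hrpair, hstep]
      have hlen : ((PySem.List.pyRange 0 b 1).length : Int) = (b.toNat : Int) := by
        rw [PySem.List.length_pyRange_one]; norm_num
      have hfresh : ∀ a ∈ PySem.List.enumerate (PySem.List.pyRange 0 b 1) r.2,
          r.1.contains a.1 = false := by
        intro a ha
        rcases (PySem.List.mem_enumerate_iff _ _ _).mp ha with ⟨k, hk, hae⟩
        apply not_contains_of_ge b (m : Int) _ _ ih1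
        rw [hae, ih2]; omega
      have hnodup : ((PySem.List.enumerate (PySem.List.pyRange 0 b 1) r.2).map
          (fun p => p.1)).Nodup := by
        rw [PySem.List.map_fst_enumerate]
        exact PySem.List.nodup_pyRange_one _ _
      have hitems := PySem.Dict.items_foldl_insert_fresh
        (PySem.List.enumerate (PySem.List.pyRange 0 b 1) r.2)
        (fun p => p.1) (fun p => [(m : Int), p.2]) r.1 hfresh hnodup
      constructor
      · rw [hitems, ih1, enum_shift, List.map_map, ih2]
        have hchunk : (PySem.List.pyRange 0 b 1).map
            ((fun a => (a.1, [(m : Int), a.2])) ∘ (fun y => ((m : Int) * (b.toNat : Int) + y, y)))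
            = chunkF b (m : Int) := by
          unfold chunkF; rfl
        rw [hchunk]
        unfold lstF
        rw [PySem.List.pyRange_one_succ_right (by exact_mod_cast Nat.zero_le m),
          List.flatMap_append]
        simp [chunkF]
      · rw [ih2, hlen]; ring

theorem flat_eq_map (b : Int) (hb : 0 < b) (n : Nat) :
    lstF b (n : Int)
      = (PySem.List.pyRange 0 ((n : Int) * b) 1).map
          (fun ii => (ii, [PySem.Int.floordiv ii b, PySem.Int.mod ii b])) := by
  induction n with
  | zero => simp [lstF, PySem.List.pyRange_one_eq_nil]
  | succ m ih =>
      have hbt : ((b.toNat : Int)) = b := by omega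
      have hcast : ((m + 1 : Nat) : Int) = (m : Int) + 1 := by push_cast; ring
      rw [hcast]
      unfold lstF
      rw [PySem.List.pyRange_one_succ_right (by exact_mod_cast Nat.zero_le m),
        List.flatMap_append]
      have hsplit : PySem.List.pyRange 0 (((m : Int) + 1) * b) 1
          = PySem.List.pyRange 0 ((m : Int) * b) 1
            ++ PySem.List.pyRange ((m : Int) * b) (((m : Int) + 1) * b) 1 := by
        apply PySem.List.pyRange_one_append
        · positivity
        · nlinarith
      unfold lstF at ih
      rw [hsplit, List.map_append, ← ih]
      congr 1
      -- the m-th chunk: each ii in [m*b, (m+1)*b) decodes as (m, ii - m*b)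
      simp only [List.flatMap_cons, List.flatMap_nil, List.append_nil]
      unfold chunkF
      apply List.ext_getElem
      · rw [List.length_map, List.length_map, PySem.List.length_pyRange_one,
          PySem.List.length_pyRange_one]
        congr 1
        ring
      · intro k h1 h2
        rw [List.length_map, PySem.List.length_pyRange_one] at h1
        have hkb : (k : Int) < b := by omega
        rw [List.getElem_map, List.getElem_map, PySem.List.getElem_pyRange_one,
          PySem.List.getElem_pyRange_one]
        have hfd : PySem.Int.floordiv ((m : Int) * b + k) b = (m : Int) := by
          rw [PySem.Int.floordiv_eq_iff_of_pos hb]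
          constructor
          · nlinarith [Int.natCast_nonneg k]
          · nlinarith [Int.natCast_nonneg k]
        have hmd : PySem.Int.mod ((m : Int) * b + k) b = (k : Int) := by
          have := PySem.Int.floordiv_mul_add_mod ((m : Int) * b + k) b
          rw [hfd] at this
          omega
        simp [hfd, hmd, hbt]

-- ===== VERDICT (by name: the statement is the Claim_ definition above) =====
theorem ind2sub_spec : Claim_equal_ind2sub := by
  intro dims _ _
  unfold Spec_ind2sub ind2sub ind2sub_alt
  simp only []
  set a := (PySem.List.pyGet? dims 0).getD 0 with ha
  set b := (PySem.List.pyGet? dims 1).getD 0 with hb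
  by_cases hA : a ≤ 0
  · rw [PySem.List.pyRange_one_eq_nil hA, List.foldl_nil, if_pos (Or.inl hA)]
    rfl
  · push Not at hA
    have hna : a = ((a.toNat : Nat) : Int) := by omega
    rw [hna]
    obtain ⟨h1, _⟩ := outer_inv b a.toNat
    rw [h1]
    by_cases hB : b ≤ 0
    · rw [if_pos (Or.inr hB)]
      unfold lstF chunkF
      rw [PySem.List.pyRange_one_eq_nil hB]
      simp
    · push Not at hB
      rw [if_neg (by omega)]
      exact flat_eq_map b hB a.toNat
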